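-- pv_equiv track=rewrite | github.com/rrkas/dsa-practice-2026 | platforms/hacker-rank/M--40--two-pluses/solutions/solution.py | twoPluses
-- ===== SOURCE A (Python) =====
-- def twoPluses(grid):
--     m, n = len(grid), len(grid[0])
--
--     u, d, l, r = [], [], [], []
--     for i in range(m):
--         u.append([0] * n)  # v: u to d
--         d.append([0] * n)  # v: d to u
--         l.append([0] * n)  # h: l to r
--         r.append([0] * n)  # h: r to l
--
--     for i in range(m):
--         for j in range(n):
--             if grid[i][j] == "G":
--                 u[i][j] = 1
--                 l[i][j] = 1
--
--                 if i > 0: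
--                     u[i][j] += u[i - 1][j]
--
--                 if j > 0:
--                     l[i][j] += l[i][j - 1]
--
--     for i in range(m - 1, -1, -1):
--         for j in range(n - 1, -1, -1):
--             if grid[i][j] == "G":
--                 d[i][j] = 1
--                 r[i][j] = 1
--
--                 if i + 1 < m:
--                     d[i][j] += d[i + 1][j]
--
--                 if j + 1 < n:
--                     r[i][j] += r[i][j + 1]
--
--     def cidx(i, j):
--         return i * n + j
--
--     pluses = []
--     for i in range(m):
--         for j in range(n):
--             if grid[i][j] != "G":
--                 continue
--
--             maxarm = min(u[i][j], d[i][j], l[i][j], r[i][j]) - 1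
--
--             for k in range(maxarm + 1):
--                 mask = 0
--                 mask |= 1 << cidx(i, j)
--
--                 for d_ in range(k + 1):
--                     mask |= 1 << cidx(i - d_, j)
--                     mask |= 1 << cidx(i + d_, j)
--                     mask |= 1 << cidx(i, j - d_)
--                     mask |= 1 << cidx(i, j + d_)
--
--                 area = 1 + 4 * k
--                 pluses.append((area, mask))
--
--     pluses.sort(reverse=True)
--
--     maxprod = 0
--
--     for i in range(len(pluses) - 1):
--         for j in range(i + 1, len(pluses)):
--             prod = pluses[i][0] * pluses[j][0]
--             if prod <= maxprod:
--                 break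
--
--             if pluses[i][1] & pluses[j][1] == 0:
--                 maxprod = prod
--
--     return maxprod
-- ===== SOURCE B (Python) =====
-- def twoPluses(grid):
--     m, n = len(grid), len(grid[0])
--
--     pluses = []
--     for i in range(m):
--         for j in range(n):
--             if grid[i][j] != "G":
--                 continue
--
--             # grow the plus arm by direct expansion; push one plus per arm length
--             mask = 1 << (i * n + j)
--             pluses.append((1, mask))
--
--             k = 1
--             while (k <= i and i + k < m and k <= j and j + k < n
--                    and grid[i - k][j] == "G" and grid[i + k][j] == "G"
--                    and grid[i][j - k] == "G" and grid[i][j + k] == "G"):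
--                 mask |= 1 << ((i - k) * n + j)
--                 mask |= 1 << ((i + k) * n + j)
--                 mask |= 1 << (i * n + (j - k))
--                 mask |= 1 << (i * n + (j + k))
--                 pluses.append((1 + 4 * k, mask))
--                 k += 1
--
--     pluses.sort(reverse=True)
--
--     maxprod = 0
--     for x in range(len(pluses) - 1):
--         for y in range(x + 1, len(pluses)):
--             prod = pluses[x][0] * pluses[y][0]
--             if prod <= maxprod:
--                 break
--
--             if pluses[x][1] & pluses[y][1] == 0:
--                 maxprod = prod
--
--     return maxprod
-- ===== Notes on version B (the rewrite author's own statement) =====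
-- stated objective: faster
-- what changed: B drops A's four m*n prefix-run tables (u/d/l/r) and A's per-arm-length mask rebuild: each plus is grown by direct outward expansion from its centre, extending one shared bitmask incrementally; the sort and pruned pairwise disjointness scan are kept.
import Mathlib
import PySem

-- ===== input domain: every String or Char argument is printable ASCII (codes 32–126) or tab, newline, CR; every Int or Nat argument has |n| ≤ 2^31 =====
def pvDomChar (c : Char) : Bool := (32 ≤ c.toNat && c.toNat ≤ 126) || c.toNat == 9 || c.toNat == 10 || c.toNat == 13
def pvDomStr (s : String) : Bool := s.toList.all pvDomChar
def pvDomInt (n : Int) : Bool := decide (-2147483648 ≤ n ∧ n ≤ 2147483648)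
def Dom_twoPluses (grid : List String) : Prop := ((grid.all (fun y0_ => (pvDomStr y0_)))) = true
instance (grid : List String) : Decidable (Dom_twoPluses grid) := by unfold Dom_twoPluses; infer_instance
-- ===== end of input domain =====

-- B drops A's four prefix-run tables and re-finds each arm by direct expansion with an
-- incrementally grown bitmask (measured faster in a timing run; same sort + pruned
-- pairwise scan); neither version observably mutates its argument.

-- ===== PORT A =====
-- grid[i][j] as a total function (indices in these programs are in range under Pre_)
def pvGat (g : List (List Char)) (i j : Nat) : Char := (g.getD i []).getD j ' '
-- 1 << (i*n + j)
def pvBit (n i j : Nat) : Int := (2 : Int) ^ (i * n + j)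
def pvMget (t : List (List Int)) (i j : Nat) : Int := (t.getD i []).getD j 0
def pvMset (t : List (List Int)) (i j : Nat) (v : Int) : List (List Int) :=
  t.set i ((t.getD i []).set j v)

-- u.append([0]*n) … done m times
def pvZeroMat (m n : Nat) : List (List Int) :=
  (List.range m).foldl (fun acc _ => acc ++ [List.replicate n (0 : Int)]) []

-- body of the first (forward) table loop at cell (i,j); state = (u, l)
def pvFwdCell (g : List (List Char)) (i j : Nat)
    (ul : List (List Int) × List (List Int)) : List (List Int) × List (List Int) :=
  if pvGat g i j == 'G' then
    let u := pvMset ul.1 i j 1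
    let l := pvMset ul.2 i j 1
    let u := if 0 < i then pvMset u i j (pvMget u i j + pvMget u (i - 1) j) else u
    let l := if 0 < j then pvMset l i j (pvMget l i j + pvMget l i (j - 1)) else l
    (u, l)
  else ul

def pvFwd (g : List (List Char)) (m n : Nat) : List (List Int) × List (List Int) :=
  (List.range m).foldl
    (fun ul i => (List.range n).foldl (fun ul j => pvFwdCell g i j ul) ul)
    (pvZeroMat m n, pvZeroMat m n)

-- body of the second (backward) table loop at cell (i,j); state = (d, r)
def pvBwdCell (g : List (List Char)) (m n i j : Nat)
    (dr : List (List Int) × List (List Int)) : List (List Int) × List (List Int) :=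
  if pvGat g i j == 'G' then
    let d := pvMset dr.1 i j 1
    let r := pvMset dr.2 i j 1
    let d := if i + 1 < m then pvMset d i j (pvMget d i j + pvMget d (i + 1) j) else d
    let r := if j + 1 < n then pvMset r i j (pvMget r i j + pvMget r i (j + 1)) else r
    (d, r)
  else dr

def pvBwd (g : List (List Char)) (m n : Nat) : List (List Int) × List (List Int) :=
  (List.range m).reverse.foldl
    (fun dr i => (List.range n).reverse.foldl (fun dr j => pvBwdCell g m n i j dr) dr)
    (pvZeroMat m n, pvZeroMat m n)

-- mask of the plus of arm k centred at (i,j) exactly as A builds it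
-- (Nat subtraction i-d / j-d is exact here: d ≤ maxarm keeps it nonnegative under Pre_)
def pvMaskA (n i j k : Nat) : Int :=
  (List.range (k + 1)).foldl
    (fun mask d =>
      PySem.Int.bor (PySem.Int.bor (PySem.Int.bor (PySem.Int.bor mask
        (pvBit n (i - d) j)) (pvBit n (i + d) j)) (pvBit n i (j - d))) (pvBit n i (j + d)))
    (pvBit n i j)

-- body of A's pluses-collecting loop at cell (i,j)
def pvCellA (g : List (List Char)) (u d l r : List (List Int)) (n i j : Nat)
    (acc : List (Int × Int)) : List (Int × Int) :=
  if pvGat g i j == 'G' then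
    let maxarm : Int :=
      min (min (min (pvMget u i j) (pvMget d i j)) (pvMget l i j)) (pvMget r i j) - 1
    (List.range (maxarm + 1).toNat).foldl
      (fun acc (k : Nat) => acc ++ [((1 : Int) + 4 * (k : Int), pvMaskA n i j k)]) acc
  else acc

-- the pruned pairwise scan (identical code in A and in B; shared helper)
def pvScanInner (p : Int × Int) : List (Int × Int) → Int → Int
  | [], best => best
  | q :: rest, best =>
    let prod := p.1 * q.1
    if prod ≤ best then best
    else if PySem.Int.band p.2 q.2 == 0 then pvScanInner p rest prod
    else pvScanInner p rest best

def pvScanOuter : List (Int × Int) → Int → Int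
  | [], best => best
  | p :: rest, best => pvScanOuter rest (pvScanInner p rest best)

def twoPluses (grid : List String) : Int :=
  let m := grid.length
  let g := grid.map (fun s => s.toList)
  let n := (g.getD 0 []).length     -- len(grid[0]); grid ≠ [] under Pre_
  let ul := pvFwd g m n
  let dr := pvBwd g m n
  let pluses :=
    (List.range m).foldl
      (fun acc i => (List.range n).foldl
        (fun acc j => pvCellA g ul.1 dr.1 ul.2 dr.2 n i j acc) acc) []
  pvScanOuter (PySem.List.sorted pluses (fun p => toLex p) true) 0

-- ===== PORT B =====
-- grow the arm outward while the four new tips are in range and 'G'; extend the mask as we go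
def pvExpand (g : List (List Char)) (m n i j : Nat) (mask : Int)
    (acc : List (Int × Int)) (k : Nat) : List (Int × Int) :=
  if h : k ≤ i ∧ i + k < m ∧ k ≤ j ∧ j + k < n
       ∧ pvGat g (i - k) j == 'G' ∧ pvGat g (i + k) j == 'G'
       ∧ pvGat g i (j - k) == 'G' ∧ pvGat g i (j + k) == 'G' then
    let mask := PySem.Int.bor (PySem.Int.bor (PySem.Int.bor (PySem.Int.bor mask
      (pvBit n (i - k) j)) (pvBit n (i + k) j)) (pvBit n i (j - k))) (pvBit n i (j + k))
    pvExpand g m n i j mask (acc ++ [((1 : Int) + 4 * (k : Int), mask)]) (k + 1)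
  else acc
termination_by m - k
decreasing_by omega

def pvCellB (g : List (List Char)) (m n i j : Nat)
    (acc : List (Int × Int)) : List (Int × Int) :=
  if pvGat g i j == 'G' then
    pvExpand g m n i j (pvBit n i j) (acc ++ [((1 : Int), pvBit n i j)]) 1
  else acc

def twoPluses_alt (grid : List String) : Int :=
  let m := grid.length
  let g := grid.map (fun s => s.toList)
  let n := (g.getD 0 []).length
  let pluses :=
    (List.range m).foldl
      (fun acc i => (List.range n).foldl
        (fun acc j => pvCellB g m n i j acc) acc) []
  pvScanOuter (PySem.List.sorted pluses (fun p => toLex p) true) 0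

-- ===== PRECONDITION & SPEC =====
-- Pre_ excludes exactly the inputs where Python A raises (IndexError): the empty grid
-- (grid[0]) and grids with a row shorter than the first row (grid[i][j] for j < n).
def Pre_twoPluses (grid : List String) : Prop :=
  grid ≠ [] ∧ ∀ s ∈ grid, grid.headI.toList.length ≤ s.toList.length
instance (grid : List String) : Decidable (Pre_twoPluses grid) := by
  unfold Pre_twoPluses; infer_instance
def pvWitness_twoPluses : List String := ["GGG", "GGG", "GGG"]

def Spec_twoPluses (grid : List String) (out : Int) : Prop := out = twoPluses_alt grid
instance (grid : List String) (out : Int) : Decidable (Spec_twoPluses grid out) := by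
  unfold Spec_twoPluses; infer_instance

-- ===== CLAIM (what is proved, stated in full; the proofs are below) =====
def Claim_equal_twoPluses : Prop :=
  ∀ (grid : List String), Dom_twoPluses grid → Pre_twoPluses grid →
    Spec_twoPluses grid (twoPluses grid)

-- ===== LEMMAS AND PROOFS =====

-- the four run lengths A's tables hold at each cell, as direct recursions
def pvUp (g : List (List Char)) (j : Nat) : Nat → Nat
  | 0 => if pvGat g 0 j == 'G' then 1 else 0
  | i + 1 => if pvGat g (i + 1) j == 'G' then pvUp g j i + 1 else 0

def pvLeft (g : List (List Char)) (i : Nat) : Nat → Nat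
  | 0 => if pvGat g i 0 == 'G' then 1 else 0
  | j + 1 => if pvGat g i (j + 1) == 'G' then pvLeft g i j + 1 else 0

def pvDown (g : List (List Char)) (m j i : Nat) : Nat :=
  if pvGat g i j == 'G' then (if i + 1 < m then pvDown g m j (i + 1) + 1 else 1) else 0
termination_by m - i
decreasing_by omega

def pvRight (g : List (List Char)) (n i j : Nat) : Nat :=
  if pvGat g i j == 'G' then (if j + 1 < n then pvRight g n i (j + 1) + 1 else 1) else 0
termination_by n - j
decreasing_by omega

-- ---- matrix primitives ----
lemma pv_mget_mset (t : List (List Int)) (i j : Nat) (v : Int) (a b : Nat)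
    (hi : i < t.length) (hj : j < (t.getD i []).length) :
    pvMget (pvMset t i j v) a b = if a = i ∧ b = j then v else pvMget t a b := by
  simp only [pvMget, pvMset, List.getD, List.getElem?_set]
  by_cases hai : i = a
  · subst hai
    simp only [List.getD] at hj
    simp only [hi, if_pos, Option.getD_some, true_and]
    rw [List.getElem?_set]
    by_cases h1 : j = b
    · subst h1; simp [hj]
    · have h2 : ¬ b = j := fun h => h1 h.symm
      simp [h1, h2]
  · simp only [if_neg hai]
    have : ¬ (a = i ∧ b = j) := fun h => hai h.1.symm
    simp [this]

lemma pv_length_mset (t : List (List Int)) (i j : Nat) (v : Int) :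
    (pvMset t i j v).length = t.length := by simp [pvMset]

lemma pv_rowlen_mset (t : List (List Int)) (i j : Nat) (v : Int) (a : Nat) :
    ((pvMset t i j v).getD a []).length = (t.getD a []).length := by
  simp only [pvMset, List.getD, List.getElem?_set]
  split_ifs with h1 h2 <;> simp_all

lemma pvZeroMat_eq (m n : Nat) : pvZeroMat m n = List.replicate m (List.replicate n (0 : Int)) := by
  induction m with
  | zero => rfl
  | succ m ih =>
    simp only [pvZeroMat, List.range_succ, List.foldl_append, List.foldl_cons, List.foldl_nil]
    rw [← pvZeroMat, ih, List.replicate_succ']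

-- ---- table invariants ----
def pvMatInv (t : List (List Int)) (m n : Nat) (val : Nat → Nat → Int) : Prop :=
  t.length = m ∧ (∀ a, a < m → (t.getD a []).length = n) ∧
    (∀ a b, pvMget t a b = if a < m ∧ b < n then val a b else 0)

-- val restricted to the cells processed so far (forward / backward row-major order)
def pvPf (f : Nat → Nat → Int) (i j : Nat) : Nat → Nat → Int :=
  fun a b => if a < i ∨ (a = i ∧ b < j) then f a b else 0

def pvPb (f : Nat → Nat → Int) (i j : Nat) : Nat → Nat → Int :=
  fun a b => if i < a ∨ (a = i ∧ j ≤ b) then f a b else 0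

def pvUpI (g : List (List Char)) : Nat → Nat → Int := fun a b => (pvUp g b a : Int)
def pvLeftI (g : List (List Char)) : Nat → Nat → Int := fun a b => (pvLeft g a b : Int)
def pvDownI (g : List (List Char)) (m : Nat) : Nat → Nat → Int := fun a b => (pvDown g m b a : Int)
def pvRightI (g : List (List Char)) (n : Nat) : Nat → Nat → Int := fun a b => (pvRight g n a b : Int)

lemma pvMatInv_congr {t : List (List Int)} {m n : Nat} {v w : Nat → Nat → Int}
    (h : ∀ a b, a < m → b < n → v a b = w a b) (hv : pvMatInv t m n v) : pvMatInv t m n w := by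
  obtain ⟨h1, h2, h3⟩ := hv
  refine ⟨h1, h2, fun a b => ?_⟩
  rw [h3 a b]
  split_ifs with hc
  · exact h a b hc.1 hc.2
  · rfl

lemma pvMatInv_zero (m n : Nat) {v : Nat → Nat → Int}
    (h : ∀ a b, a < m → b < n → v a b = 0) : pvMatInv (pvZeroMat m n) m n v := by
  rw [pvZeroMat_eq]
  refine ⟨by simp, fun a ha => ?_, fun a b => ?_⟩
  · simp [List.getD, ha]
  · simp only [pvMget, List.getD, List.getElem?_replicate]
    by_cases ha : a < m
    · by_cases hb : b < n
      · simp [ha, hb, h a b ha hb]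
      · simp [ha, hb]
    · simp [ha]

lemma pvMatInv_set {t : List (List Int)} {m n : Nat} {val : Nat → Nat → Int}
    (h : pvMatInv t m n val) (i j : Nat) (hi : i < m) (hj : j < n) (v : Int) :
    pvMatInv (pvMset t i j v) m n (fun a b => if a = i ∧ b = j then v else val a b) := by
  obtain ⟨h1, h2, h3⟩ := h
  refine ⟨by rw [pv_length_mset, h1], fun a ha => by rw [pv_rowlen_mset]; exact h2 a ha,
    fun a b => ?_⟩
  rw [pv_mget_mset t i j v a b (by omega) (by rw [h2 i hi]; exact hj)]
  by_cases hc : a = i ∧ b = j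
  · obtain ⟨rfl, rfl⟩ := hc
    simp [hi, hj]
  · simp [hc, h3 a b]

lemma pvPf_skip {f : Nat → Nat → Int} {i j a b : Nat} (hc : ¬ (a = i ∧ b = j)) :
    pvPf f i (j + 1) a b = pvPf f i j a b := by
  simp only [pvPf]
  exact if_congr (by omega) rfl rfl

lemma pvPf_self {f : Nat → Nat → Int} {i j : Nat} : pvPf f i (j + 1) i j = f i j := by
  simp [pvPf]

lemma pvPf_lt {f : Nat → Nat → Int} {i j a b : Nat} (h : a < i ∨ (a = i ∧ b < j)) :
    pvPf f i j a b = f a b := by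
  simp only [pvPf, if_pos h]

lemma pvUp_zero {g : List (List Char)} {i j : Nat} (hG : ¬ pvGat g i j = 'G') :
    pvUp g j i = 0 := by
  cases i <;> simp [pvUp, hG]

lemma pvLeft_zero {g : List (List Char)} {i j : Nat} (hG : ¬ pvGat g i j = 'G') :
    pvLeft g i j = 0 := by
  cases j <;> simp [pvLeft, hG]

lemma pvFwd_step (g : List (List Char)) {m n : Nat} (i j : Nat) (hi : i < m) (hj : j < n)
    {ul : List (List Int) × List (List Int)}
    (hu : pvMatInv ul.1 m n (pvPf (pvUpI g) i j)) (hl : pvMatInv ul.2 m n (pvPf (pvLeftI g) i j)) :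
    pvMatInv (pvFwdCell g i j ul).1 m n (pvPf (pvUpI g) i (j + 1)) ∧
      pvMatInv (pvFwdCell g i j ul).2 m n (pvPf (pvLeftI g) i (j + 1)) := by
  by_cases hG : pvGat g i j = 'G'
  · have hGb : (pvGat g i j == 'G') = true := by simpa using hG
    have e1 : (pvFwdCell g i j ul).1 =
        (if 0 < i then
          pvMset (pvMset ul.1 i j 1) i j
            (pvMget (pvMset ul.1 i j 1) i j + pvMget (pvMset ul.1 i j 1) (i - 1) j)
        else pvMset ul.1 i j 1) := by
      rw [pvFwdCell, if_pos hGb]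
    have e2 : (pvFwdCell g i j ul).2 =
        (if 0 < j then
          pvMset (pvMset ul.2 i j 1) i j
            (pvMget (pvMset ul.2 i j 1) i j + pvMget (pvMset ul.2 i j 1) i (j - 1))
        else pvMset ul.2 i j 1) := by
      rw [pvFwdCell, if_pos hGb]
    constructor
    · rw [e1]
      have hset1 := pvMatInv_set hu i j hi hj 1
      by_cases hpos : 0 < i
      · rw [if_pos hpos]
        have hv1 : pvMget (pvMset ul.1 i j 1) i j = 1 := by
          rw [hset1.2.2 i j]; beta_reduce
          rw [if_pos ⟨hi, hj⟩, if_pos ⟨rfl, rfl⟩]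
        have hv2 : pvMget (pvMset ul.1 i j 1) (i - 1) j = (pvUp g j (i - 1) : Int) := by
          rw [hset1.2.2 (i - 1) j]; beta_reduce
          rw [if_pos (⟨by omega, hj⟩ : i - 1 < m ∧ j < n),
            if_neg (by omega : ¬ (i - 1 = i ∧ j = j)), pvPf_lt (by omega), pvUpI]
        refine pvMatInv_congr ?_ (pvMatInv_set hset1 i j hi hj _)
        intro a b ha hb
        beta_reduce
        by_cases hc : a = i ∧ b = j
        · obtain ⟨rfl, rfl⟩ := hc
          rw [if_pos ⟨rfl, rfl⟩, hv1, hv2, pvPf_self]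
          have hrec : pvUp g b a = pvUp g b (a - 1) + 1 := by
            obtain ⟨a', rfl⟩ : ∃ a', a = a' + 1 := ⟨a - 1, by omega⟩
            simp [pvUp, hG]
          simp only [pvUpI]
          rw [hrec]; push_cast; ring
        · rw [if_neg hc, if_neg hc, pvPf_skip hc]
      · rw [if_neg hpos]
        refine pvMatInv_congr ?_ hset1
        intro a b ha hb
        beta_reduce
        by_cases hc : a = i ∧ b = j
        · obtain ⟨rfl, rfl⟩ := hc
          rw [if_pos ⟨rfl, rfl⟩, pvPf_self]
          have ha0 : a = 0 := by omega
          simp only [pvUpI, ha0]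
          simp [pvUp, ha0 ▸ hG]
        · rw [if_neg hc, pvPf_skip hc]
    · rw [e2]
      have hset1 := pvMatInv_set hl i j hi hj 1
      by_cases hpos : 0 < j
      · rw [if_pos hpos]
        have hv1 : pvMget (pvMset ul.2 i j 1) i j = 1 := by
          rw [hset1.2.2 i j]; beta_reduce
          rw [if_pos ⟨hi, hj⟩, if_pos ⟨rfl, rfl⟩]
        have hv2 : pvMget (pvMset ul.2 i j 1) i (j - 1) = (pvLeft g i (j - 1) : Int) := by
          rw [hset1.2.2 i (j - 1)]; beta_reduce
          rw [if_pos (⟨hi, by omega⟩ : i < m ∧ j - 1 < n),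
            if_neg (by omega : ¬ (i = i ∧ j - 1 = j)), pvPf_lt (by omega), pvLeftI]
        refine pvMatInv_congr ?_ (pvMatInv_set hset1 i j hi hj _)
        intro a b ha hb
        beta_reduce
        by_cases hc : a = i ∧ b = j
        · obtain ⟨rfl, rfl⟩ := hc
          rw [if_pos ⟨rfl, rfl⟩, hv1, hv2, pvPf_self]
          have hrec : pvLeft g a b = pvLeft g a (b - 1) + 1 := by
            obtain ⟨b', rfl⟩ : ∃ b', b = b' + 1 := ⟨b - 1, by omega⟩
            simp [pvLeft, hG]
          simp only [pvLeftI]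
          rw [hrec]; push_cast; ring
        · rw [if_neg hc, if_neg hc, pvPf_skip hc]
      · rw [if_neg hpos]
        refine pvMatInv_congr ?_ hset1
        intro a b ha hb
        beta_reduce
        by_cases hc : a = i ∧ b = j
        · obtain ⟨rfl, rfl⟩ := hc
          rw [if_pos ⟨rfl, rfl⟩, pvPf_self]
          have hb0 : b = 0 := by omega
          simp only [pvLeftI, hb0]
          simp [pvLeft, hb0 ▸ hG]
        · rw [if_neg hc, pvPf_skip hc]
  · have hGb : ¬ ((pvGat g i j == 'G') = true) := by simpa using hG
    have e : pvFwdCell g i j ul = ul := by rw [pvFwdCell, if_neg hGb]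
    rw [e]
    constructor
    · refine pvMatInv_congr ?_ hu
      intro a b ha hb
      by_cases hc : a = i ∧ b = j
      · obtain ⟨rfl, rfl⟩ := hc
        rw [pvPf_self]
        simp [pvPf, pvUpI, pvUp_zero hG]
      · rw [pvPf_skip hc]
    · refine pvMatInv_congr ?_ hl
      intro a b ha hb
      by_cases hc : a = i ∧ b = j
      · obtain ⟨rfl, rfl⟩ := hc
        rw [pvPf_self]
        simp [pvPf, pvLeftI, pvLeft_zero hG]
      · rw [pvPf_skip hc]

lemma pvPb_skip {f : Nat → Nat → Int} {i j a b : Nat} (hc : ¬ (a = i ∧ b = j)) :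
    pvPb f i j a b = pvPb f i (j + 1) a b := by
  simp only [pvPb]
  exact if_congr (by omega) rfl rfl

lemma pvPb_self {f : Nat → Nat → Int} {i j : Nat} : pvPb f i j i j = f i j := by
  simp [pvPb]

lemma pvPb_gt {f : Nat → Nat → Int} {i j a b : Nat} (h : i < a ∨ (a = i ∧ j ≤ b)) :
    pvPb f i j a b = f a b := by
  simp only [pvPb, if_pos h]

lemma pvDown_zero {g : List (List Char)} {m i j : Nat} (hG : ¬ pvGat g i j = 'G') :
    pvDown g m j i = 0 := by
  rw [pvDown]; simp [hG]

lemma pvRight_zero {g : List (List Char)} {n i j : Nat} (hG : ¬ pvGat g i j = 'G') :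
    pvRight g n i j = 0 := by
  rw [pvRight]; simp [hG]

lemma pvBwd_step (g : List (List Char)) {m n : Nat} (i j : Nat) (hi : i < m) (hj : j < n)
    {dr : List (List Int) × List (List Int)}
    (hd : pvMatInv dr.1 m n (pvPb (pvDownI g m) i (j + 1)))
    (hr : pvMatInv dr.2 m n (pvPb (pvRightI g n) i (j + 1))) :
    pvMatInv (pvBwdCell g m n i j dr).1 m n (pvPb (pvDownI g m) i j) ∧
      pvMatInv (pvBwdCell g m n i j dr).2 m n (pvPb (pvRightI g n) i j) := by
  by_cases hG : pvGat g i j = 'G'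
  · have hGb : (pvGat g i j == 'G') = true := by simpa using hG
    have e1 : (pvBwdCell g m n i j dr).1 =
        (if i + 1 < m then
          pvMset (pvMset dr.1 i j 1) i j
            (pvMget (pvMset dr.1 i j 1) i j + pvMget (pvMset dr.1 i j 1) (i + 1) j)
        else pvMset dr.1 i j 1) := by
      rw [pvBwdCell, if_pos hGb]
    have e2 : (pvBwdCell g m n i j dr).2 =
        (if j + 1 < n then
          pvMset (pvMset dr.2 i j 1) i j
            (pvMget (pvMset dr.2 i j 1) i j + pvMget (pvMset dr.2 i j 1) i (j + 1))
        else pvMset dr.2 i j 1) := by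
      rw [pvBwdCell, if_pos hGb]
    constructor
    · rw [e1]
      have hset1 := pvMatInv_set hd i j hi hj 1
      by_cases hpos : i + 1 < m
      · rw [if_pos hpos]
        have hv1 : pvMget (pvMset dr.1 i j 1) i j = 1 := by
          rw [hset1.2.2 i j]; beta_reduce
          rw [if_pos ⟨hi, hj⟩, if_pos ⟨rfl, rfl⟩]
        have hv2 : pvMget (pvMset dr.1 i j 1) (i + 1) j = (pvDown g m j (i + 1) : Int) := by
          rw [hset1.2.2 (i + 1) j]; beta_reduce
          rw [if_pos (⟨hpos, hj⟩ : i + 1 < m ∧ j < n),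
            if_neg (by omega : ¬ (i + 1 = i ∧ j = j)), pvPb_gt (by omega), pvDownI]
        refine pvMatInv_congr ?_ (pvMatInv_set hset1 i j hi hj _)
        intro a b ha hb
        beta_reduce
        by_cases hc : a = i ∧ b = j
        · obtain ⟨rfl, rfl⟩ := hc
          rw [if_pos ⟨rfl, rfl⟩, hv1, hv2, pvPb_self]
          have hrec : pvDown g m b a = pvDown g m b (a + 1) + 1 := by
            rw [pvDown, if_pos (by simpa using hG), if_pos hpos]
          simp only [pvDownI]
          rw [hrec]; push_cast; ring
        · rw [if_neg hc, if_neg hc, pvPb_skip hc]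
      · rw [if_neg hpos]
        refine pvMatInv_congr ?_ hset1
        intro a b ha hb
        beta_reduce
        by_cases hc : a = i ∧ b = j
        · obtain ⟨rfl, rfl⟩ := hc
          rw [if_pos ⟨rfl, rfl⟩, pvPb_self]
          simp only [pvDownI]
          rw [pvDown, if_pos (by simpa using hG), if_neg hpos]
          norm_num
        · rw [if_neg hc, pvPb_skip hc]
    · rw [e2]
      have hset1 := pvMatInv_set hr i j hi hj 1
      by_cases hpos : j + 1 < n
      · rw [if_pos hpos]
        have hv1 : pvMget (pvMset dr.2 i j 1) i j = 1 := by
          rw [hset1.2.2 i j]; beta_reduce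
          rw [if_pos ⟨hi, hj⟩, if_pos ⟨rfl, rfl⟩]
        have hv2 : pvMget (pvMset dr.2 i j 1) i (j + 1) = (pvRight g n i (j + 1) : Int) := by
          rw [hset1.2.2 i (j + 1)]; beta_reduce
          rw [if_pos (⟨hi, hpos⟩ : i < m ∧ j + 1 < n),
            if_neg (by omega : ¬ (i = i ∧ j + 1 = j)), pvPb_gt (by omega), pvRightI]
        refine pvMatInv_congr ?_ (pvMatInv_set hset1 i j hi hj _)
        intro a b ha hb
        beta_reduce
        by_cases hc : a = i ∧ b = j
        · obtain ⟨rfl, rfl⟩ := hc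
          rw [if_pos ⟨rfl, rfl⟩, hv1, hv2, pvPb_self]
          have hrec : pvRight g n a b = pvRight g n a (b + 1) + 1 := by
            rw [pvRight, if_pos (by simpa using hG), if_pos hpos]
          simp only [pvRightI]
          rw [hrec]; push_cast; ring
        · rw [if_neg hc, if_neg hc, pvPb_skip hc]
      · rw [if_neg hpos]
        refine pvMatInv_congr ?_ hset1
        intro a b ha hb
        beta_reduce
        by_cases hc : a = i ∧ b = j
        · obtain ⟨rfl, rfl⟩ := hc
          rw [if_pos ⟨rfl, rfl⟩, pvPb_self]
          simp only [pvRightI]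
          rw [pvRight, if_pos (by simpa using hG), if_neg hpos]
          norm_num
        · rw [if_neg hc, pvPb_skip hc]
  · have hGb : ¬ ((pvGat g i j == 'G') = true) := by simpa using hG
    have e : pvBwdCell g m n i j dr = dr := by rw [pvBwdCell, if_neg hGb]
    rw [e]
    constructor
    · refine pvMatInv_congr ?_ hd
      intro a b ha hb
      by_cases hc : a = i ∧ b = j
      · obtain ⟨rfl, rfl⟩ := hc
        rw [pvPb_self]
        simp [pvPb, pvDownI, pvDown_zero hG]
      · rw [pvPb_skip hc]
    · refine pvMatInv_congr ?_ hr
      intro a b ha hb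
      by_cases hc : a = i ∧ b = j
      · obtain ⟨rfl, rfl⟩ := hc
        rw [pvPb_self]
        simp [pvPb, pvRightI, pvRight_zero hG]
      · rw [pvPb_skip hc]

lemma pvFwd_inner (g : List (List Char)) {m n : Nat} (i : Nat) (hi : i < m) :
    ∀ (c j₀ : Nat) (ul : List (List Int) × List (List Int)), j₀ + c = n →
      pvMatInv ul.1 m n (pvPf (pvUpI g) i j₀) → pvMatInv ul.2 m n (pvPf (pvLeftI g) i j₀) →
      pvMatInv ((List.range' j₀ c).foldl (fun ul j => pvFwdCell g i j ul) ul).1 m n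
          (pvPf (pvUpI g) i n) ∧
        pvMatInv ((List.range' j₀ c).foldl (fun ul j => pvFwdCell g i j ul) ul).2 m n
          (pvPf (pvLeftI g) i n) := by
  intro c
  induction c with
  | zero =>
    intro j₀ ul h hu hl
    obtain rfl : j₀ = n := by omega
    simpa using ⟨hu, hl⟩
  | succ c ih =>
    intro j₀ ul h hu hl
    rw [List.range'_succ, List.foldl_cons]
    obtain ⟨hu', hl'⟩ := pvFwd_step g i j₀ hi (by omega) hu hl
    exact ih (j₀ + 1) _ (by omega) hu' hl'

lemma pvFwd_outer (g : List (List Char)) {m n : Nat} :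
    ∀ (c i₀ : Nat) (ul : List (List Int) × List (List Int)), i₀ + c = m →
      pvMatInv ul.1 m n (pvPf (pvUpI g) i₀ 0) → pvMatInv ul.2 m n (pvPf (pvLeftI g) i₀ 0) →
      pvMatInv ((List.range' i₀ c).foldl
          (fun ul i => (List.range n).foldl (fun ul j => pvFwdCell g i j ul) ul) ul).1 m n
          (pvPf (pvUpI g) m 0) ∧
        pvMatInv ((List.range' i₀ c).foldl
          (fun ul i => (List.range n).foldl (fun ul j => pvFwdCell g i j ul) ul) ul).2 m n
          (pvPf (pvLeftI g) m 0) := by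
  intro c
  induction c with
  | zero =>
    intro i₀ ul h hu hl
    obtain rfl : i₀ = m := by omega
    simpa using ⟨hu, hl⟩
  | succ c ih =>
    intro i₀ ul h hu hl
    rw [List.range'_succ, List.foldl_cons]
    have hrow := pvFwd_inner g i₀ (by omega) n 0 ul (by omega) hu hl
    rw [← List.range_eq_range'] at hrow
    refine ih (i₀ + 1) _ (by omega) (pvMatInv_congr ?_ hrow.1) (pvMatInv_congr ?_ hrow.2) <;>
    · intro a b ha hb
      simp only [pvPf]
      exact if_congr (by omega) rfl rfl

lemma pvFwd_spec (g : List (List Char)) (m n : Nat) :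
    pvMatInv (pvFwd g m n).1 m n (pvUpI g) ∧ pvMatInv (pvFwd g m n).2 m n (pvLeftI g) := by
  have hz : pvMatInv (pvZeroMat m n) m n (pvPf (pvUpI g) 0 0) ∧
      pvMatInv (pvZeroMat m n) m n (pvPf (pvLeftI g) 0 0) := by
    constructor <;> exact pvMatInv_zero m n (fun a b _ _ => by simp [pvPf])
  have h := pvFwd_outer g m 0 (pvZeroMat m n, pvZeroMat m n) (by omega) hz.1 hz.2
  rw [← List.range_eq_range'] at h
  unfold pvFwd
  constructor <;> [refine pvMatInv_congr ?_ h.1; refine pvMatInv_congr ?_ h.2] <;>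
  · intro a b ha hb
    rw [pvPf_lt (by omega)]

lemma pvBwd_inner (g : List (List Char)) {m n : Nat} (i : Nat) (hi : i < m) :
    ∀ (c : Nat) (dr : List (List Int) × List (List Int)), c ≤ n →
      pvMatInv dr.1 m n (pvPb (pvDownI g m) i c) → pvMatInv dr.2 m n (pvPb (pvRightI g n) i c) →
      pvMatInv (((List.range c).reverse.foldl (fun dr j => pvBwdCell g m n i j dr) dr)).1 m n
          (pvPb (pvDownI g m) i 0) ∧
        pvMatInv (((List.range c).reverse.foldl (fun dr j => pvBwdCell g m n i j dr) dr)).2 m n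
          (pvPb (pvRightI g n) i 0) := by
  intro c
  induction c with
  | zero => intro dr h hd hr; simpa using ⟨hd, hr⟩
  | succ c ih =>
    intro dr h hd hr
    rw [List.range_succ, List.reverse_append, List.reverse_singleton, List.singleton_append,
      List.foldl_cons]
    obtain ⟨hd', hr'⟩ := pvBwd_step g i c hi (by omega) hd hr
    exact ih _ (by omega) hd' hr'

lemma pvBwd_outer (g : List (List Char)) {m n : Nat} :
    ∀ (c : Nat) (dr : List (List Int) × List (List Int)), c ≤ m →
      pvMatInv dr.1 m n (pvPb (pvDownI g m) c 0) → pvMatInv dr.2 m n (pvPb (pvRightI g n) c 0) →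
      pvMatInv (((List.range c).reverse.foldl
          (fun dr i => (List.range n).reverse.foldl (fun dr j => pvBwdCell g m n i j dr) dr) dr)).1
          m n (pvPb (pvDownI g m) 0 0) ∧
        pvMatInv (((List.range c).reverse.foldl
          (fun dr i => (List.range n).reverse.foldl (fun dr j => pvBwdCell g m n i j dr) dr) dr)).2
          m n (pvPb (pvRightI g n) 0 0) := by
  intro c
  induction c with
  | zero => intro dr h hd hr; simpa using ⟨hd, hr⟩
  | succ c ih =>
    intro dr h hd hr
    rw [List.range_succ, List.reverse_append, List.reverse_singleton, List.singleton_append,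
      List.foldl_cons]
    have hd0 : pvMatInv dr.1 m n (pvPb (pvDownI g m) c n) :=
      pvMatInv_congr (fun a b ha hb => by simp only [pvPb]; exact if_congr (by omega) rfl rfl) hd
    have hr0 : pvMatInv dr.2 m n (pvPb (pvRightI g n) c n) :=
      pvMatInv_congr (fun a b ha hb => by simp only [pvPb]; exact if_congr (by omega) rfl rfl) hr
    obtain ⟨hd', hr'⟩ := pvBwd_inner g c (by omega) n dr (le_refl n) hd0 hr0
    exact ih _ (by omega) hd' hr'

lemma pvBwd_spec (g : List (List Char)) (m n : Nat) :
    pvMatInv (pvBwd g m n).1 m n (pvDownI g m) ∧ pvMatInv (pvBwd g m n).2 m n (pvRightI g n) := by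
  have hz : pvMatInv (pvZeroMat m n) m n (pvPb (pvDownI g m) m 0) ∧
      pvMatInv (pvZeroMat m n) m n (pvPb (pvRightI g n) m 0) := by
    constructor <;> exact pvMatInv_zero m n (fun a b ha hb => by simp [pvPb]; omega)
  have h := pvBwd_outer g m (pvZeroMat m n, pvZeroMat m n) (le_refl m) hz.1 hz.2
  unfold pvBwd
  constructor <;> [refine pvMatInv_congr ?_ h.1; refine pvMatInv_congr ?_ h.2] <;>
  · intro a b ha hb
    rw [pvPb_gt (by omega)]

-- ---- run-length facts ----
lemma pvUp_lt (g : List (List Char)) (j : Nat) :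
    ∀ i s, s < pvUp g j i → s ≤ i ∧ pvGat g (i - s) j = 'G' := by
  intro i
  induction i with
  | zero =>
    intro s hs
    unfold pvUp at hs
    split at hs <;> rename_i hg
    · interval_cases s
      exact ⟨le_refl 0, by simpa using hg⟩
    · omega
  | succ i ih =>
    intro s hs
    unfold pvUp at hs
    split at hs <;> rename_i hg
    · match s with
      | 0 => exact ⟨Nat.zero_le _, by simpa using hg⟩
      | s + 1 =>
        obtain ⟨h1, h2⟩ := ih s (by omega)
        exact ⟨by omega, by simpa [Nat.succ_sub_succ] using h2⟩
    · omega

lemma pvLeft_lt (g : List (List Char)) (i : Nat) :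
    ∀ j s, s < pvLeft g i j → s ≤ j ∧ pvGat g i (j - s) = 'G' := by
  intro j
  induction j with
  | zero =>
    intro s hs
    unfold pvLeft at hs
    split at hs <;> rename_i hg
    · interval_cases s
      exact ⟨le_refl 0, by simpa using hg⟩
    · omega
  | succ j ih =>
    intro s hs
    unfold pvLeft at hs
    split at hs <;> rename_i hg
    · match s with
      | 0 => exact ⟨Nat.zero_le _, by simpa using hg⟩
      | s + 1 =>
        obtain ⟨h1, h2⟩ := ih s (by omega)
        exact ⟨by omega, by simpa [Nat.succ_sub_succ] using h2⟩
    · omega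

lemma pvDown_lt (g : List (List Char)) (m j : Nat) :
    ∀ i, i < m → ∀ s, s < pvDown g m j i → i + s < m ∧ pvGat g (i + s) j = 'G' := by
  intro i
  induction hfuel : m - i generalizing i with
  | zero => intro hi; omega
  | succ f ih =>
    intro hi s hs
    rw [pvDown] at hs
    split at hs <;> rename_i hg
    · split at hs <;> rename_i hlt
      · match s with
        | 0 => exact ⟨by omega, by simpa using hg⟩
        | s + 1 =>
          obtain ⟨h1, h2⟩ := ih (i + 1) (by omega) hlt s (by omega)
          exact ⟨by omega, by rw [show i + (s + 1) = i + 1 + s by omega]; exact h2⟩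
      · interval_cases s
        exact ⟨by omega, by simpa using hg⟩
    · omega

lemma pvRight_lt (g : List (List Char)) (n i : Nat) :
    ∀ j, j < n → ∀ s, s < pvRight g n i j → j + s < n ∧ pvGat g i (j + s) = 'G' := by
  intro j
  induction hfuel : n - j generalizing j with
  | zero => intro hj; omega
  | succ f ih =>
    intro hj s hs
    rw [pvRight] at hs
    split at hs <;> rename_i hg
    · split at hs <;> rename_i hlt
      · match s with
        | 0 => exact ⟨by omega, by simpa using hg⟩
        | s + 1 =>
          obtain ⟨h1, h2⟩ := ih (j + 1) (by omega) hlt s (by omega)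
          exact ⟨by omega, by rw [show j + (s + 1) = j + 1 + s by omega]; exact h2⟩
      · interval_cases s
        exact ⟨by omega, by simpa using hg⟩
    · omega

lemma pvUp_stop (g : List (List Char)) (j : Nat) :
    ∀ i, pvGat g i j = 'G' →
      pvUp g j i = i + 1 ∨ (pvUp g j i ≤ i ∧ ¬ pvGat g (i - pvUp g j i) j = 'G') := by
  intro i
  induction i with
  | zero => intro hg; left; simp [pvUp, hg]
  | succ i ih =>
    intro hg
    by_cases hg' : pvGat g i j = 'G'
    · rcases ih hg' with h | ⟨h1, h2⟩
      · left; simp [pvUp, hg, h]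
      · right
        refine ⟨by simp [pvUp, hg]; omega, ?_⟩
        simpa [pvUp, hg, Nat.succ_sub_succ] using h2
    · right
      have h0 : pvUp g j i = 0 := by cases i <;> simp [pvUp, hg']
      have e : pvUp g j (i + 1) = 1 := by simp [pvUp, hg, h0]
      rw [e]
      exact ⟨by omega, by simpa using hg'⟩

lemma pvLeft_stop (g : List (List Char)) (i : Nat) :
    ∀ j, pvGat g i j = 'G' →
      pvLeft g i j = j + 1 ∨ (pvLeft g i j ≤ j ∧ ¬ pvGat g i (j - pvLeft g i j) = 'G') := by
  intro j
  induction j with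
  | zero => intro hg; left; simp [pvLeft, hg]
  | succ j ih =>
    intro hg
    by_cases hg' : pvGat g i j = 'G'
    · rcases ih hg' with h | ⟨h1, h2⟩
      · left; simp [pvLeft, hg, h]
      · right
        refine ⟨by simp [pvLeft, hg]; omega, ?_⟩
        simpa [pvLeft, hg, Nat.succ_sub_succ] using h2
    · right
      have h0 : pvLeft g i j = 0 := by cases j <;> simp [pvLeft, hg']
      have e : pvLeft g i (j + 1) = 1 := by simp [pvLeft, hg, h0]
      rw [e]
      exact ⟨by omega, by simpa using hg'⟩

lemma pvDown_stop (g : List (List Char)) (m j : Nat) :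
    ∀ i, i < m → pvGat g i j = 'G' →
      i + pvDown g m j i = m ∨ (i + pvDown g m j i < m ∧ ¬ pvGat g (i + pvDown g m j i) j = 'G') := by
  intro i
  induction hfuel : m - i generalizing i with
  | zero => omega
  | succ f ih =>
    intro hi hg
    have hgb : (pvGat g i j == 'G') = true := by simpa using hg
    rw [pvDown, if_pos hgb]
    by_cases hlt : i + 1 < m
    · rw [if_pos hlt]
      by_cases hg' : pvGat g (i + 1) j = 'G'
      · rcases ih (i + 1) (by omega) hlt hg' with h | ⟨h1, h2⟩
        · left; omega
        · right
          refine ⟨by omega, ?_⟩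
          rw [show i + (pvDown g m j (i + 1) + 1) = i + 1 + pvDown g m j (i + 1) by omega]
          exact h2
      · right
        have hgb' : ¬ ((pvGat g (i + 1) j == 'G') = true) := by simpa using hg'
        rw [pvDown, if_neg hgb']
        exact ⟨by omega, by simpa using hg'⟩
    · rw [if_neg hlt]; left; omega

lemma pvRight_stop (g : List (List Char)) (n i : Nat) :
    ∀ j, j < n → pvGat g i j = 'G' →
      j + pvRight g n i j = n ∨ (j + pvRight g n i j < n ∧ ¬ pvGat g i (j + pvRight g n i j) = 'G') := by
  intro j
  induction hfuel : n - j generalizing j with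
  | zero => omega
  | succ f ih =>
    intro hj hg
    have hgb : (pvGat g i j == 'G') = true := by simpa using hg
    rw [pvRight, if_pos hgb]
    by_cases hlt : j + 1 < n
    · rw [if_pos hlt]
      by_cases hg' : pvGat g i (j + 1) = 'G'
      · rcases ih (j + 1) (by omega) hlt hg' with h | ⟨h1, h2⟩
        · left; omega
        · right
          refine ⟨by omega, ?_⟩
          rw [show j + (pvRight g n i (j + 1) + 1) = j + 1 + pvRight g n i (j + 1) by omega]
          exact h2
      · right
        have hgb' : ¬ ((pvGat g i (j + 1) == 'G') = true) := by simpa using hg'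
        rw [pvRight, if_neg hgb']
        exact ⟨by omega, by simpa using hg'⟩
    · rw [if_neg hlt]; left; omega

lemma pvUp_pos (g : List (List Char)) (j i : Nat) (h : pvGat g i j = 'G') : 1 ≤ pvUp g j i := by
  cases i <;> simp [pvUp, h]

lemma pvDown_pos (g : List (List Char)) (m j i : Nat) (h : pvGat g i j = 'G') : 1 ≤ pvDown g m j i := by
  have hb : (pvGat g i j == 'G') = true := by simpa using h
  rw [pvDown, if_pos hb]; split <;> omega

lemma pvLeft_pos (g : List (List Char)) (i j : Nat) (h : pvGat g i j = 'G') : 1 ≤ pvLeft g i j := by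
  cases j <;> simp [pvLeft, h]

lemma pvRight_pos (g : List (List Char)) (n i j : Nat) (h : pvGat g i j = 'G') : 1 ≤ pvRight g n i j := by
  have hb : (pvGat g i j == 'G') = true := by simpa using h
  rw [pvRight, if_pos hb]; split <;> omega

-- ---- masks ----
lemma pvMaskA_zero (n i j : Nat) : pvMaskA n i j 0 = pvBit n i j := by
  show (List.range 1).foldl _ _ = _
  simp only [List.range_succ, List.range_zero, List.nil_append, List.foldl_cons, List.foldl_nil,
    Nat.sub_zero, Nat.add_zero]
  have hb : ∀ x : Int, 0 ≤ x → PySem.Int.bor x x = x := by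
    intro x hx
    rw [PySem.Int.bor_of_nonneg hx hx]
    simp [Nat.or_self, hx]
  have hbit : (0 : Int) ≤ pvBit n i j := by unfold pvBit; positivity
  rw [hb _ hbit, hb _ hbit, hb _ hbit, hb _ hbit]

lemma pvMaskA_succ (n i j k : Nat) :
    pvMaskA n i j (k + 1) =
      PySem.Int.bor (PySem.Int.bor (PySem.Int.bor (PySem.Int.bor (pvMaskA n i j k)
        (pvBit n (i - (k + 1)) j)) (pvBit n (i + (k + 1)) j)) (pvBit n i (j - (k + 1))))
        (pvBit n i (j + (k + 1))) := by
  unfold pvMaskA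
  rw [List.range_succ, List.foldl_append]
  rfl

-- ---- the expansion loop runs exactly to the table arm bound ----
def pvCond (g : List (List Char)) (m n i j s : Nat) : Prop :=
  s ≤ i ∧ i + s < m ∧ s ≤ j ∧ j + s < n
    ∧ pvGat g (i - s) j = 'G' ∧ pvGat g (i + s) j = 'G'
    ∧ pvGat g i (j - s) = 'G' ∧ pvGat g i (j + s) = 'G'

lemma pvExpand_run (g : List (List Char)) (m n i j K : Nat)
    (hcond : ∀ s, 1 ≤ s → s < K → pvCond g m n i j s)
    (hstop : ¬ pvCond g m n i j K) :
    ∀ t k acc, k + t = K → 1 ≤ k →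
      pvExpand g m n i j (pvMaskA n i j (k - 1)) acc k =
        acc ++ (List.range' k t).map (fun (s : Nat) => ((1 : Int) + 4 * (s : Int), pvMaskA n i j s)) := by
  intro t
  induction t with
  | zero =>
    intro k acc h hk
    obtain rfl : k = K := by omega
    rw [pvExpand]
    rw [dif_neg ?stop]
    · simp
    case stop =>
      intro hcontra
      exact hstop ⟨hcontra.1, hcontra.2.1, hcontra.2.2.1, hcontra.2.2.2.1,
        by simpa using hcontra.2.2.2.2.1, by simpa using hcontra.2.2.2.2.2.1,
        by simpa using hcontra.2.2.2.2.2.2.1, by simpa using hcontra.2.2.2.2.2.2.2⟩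
  | succ t ih =>
    intro k acc h hk
    have hck : pvCond g m n i j k := hcond k hk (by omega)
    obtain ⟨h1, h2, h3, h4, h5, h6, h7, h8⟩ := hck
    rw [pvExpand]
    rw [dif_pos ⟨h1, h2, h3, h4, by simpa using h5, by simpa using h6,
      by simpa using h7, by simpa using h8⟩]
    have hmask : PySem.Int.bor (PySem.Int.bor (PySem.Int.bor (PySem.Int.bor
        (pvMaskA n i j (k - 1)) (pvBit n (i - k) j)) (pvBit n (i + k) j)) (pvBit n i (j - k)))
        (pvBit n i (j + k)) = pvMaskA n i j k := by
      obtain ⟨k', rfl⟩ : ∃ k', k = k' + 1 := ⟨k - 1, by omega⟩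
      rw [pvMaskA_succ]
      norm_num
    simp only [hmask]
    have := ih (k + 1) (acc ++ [((1 : Int) + 4 * (k : Int), pvMaskA n i j k)]) (by omega) (by omega)
    rw [show k + 1 - 1 = k by omega] at this
    rw [this, List.range'_succ, List.map_cons, List.append_assoc, List.singleton_append]

lemma pvRange_decomp (K : Nat) (h : 1 ≤ K) : List.range K = 0 :: List.range' 1 (K - 1) := by
  obtain ⟨K', rfl⟩ : ∃ K', K = K' + 1 := ⟨K - 1, by omega⟩
  rw [List.range_eq_range', List.range'_succ]
  simp

lemma pvCell_eq (g : List (List Char)) (m n i j : Nat) (hi : i < m) (hj : j < n)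
    (acc : List (Int × Int)) :
    pvCellA g (pvFwd g m n).1 (pvBwd g m n).1 (pvFwd g m n).2 (pvBwd g m n).2 n i j acc =
      pvCellB g m n i j acc := by
  by_cases hG : pvGat g i j = 'G'
  · have hGb : (pvGat g i j == 'G') = true := by simpa using hG
    have hu := (pvFwd_spec g m n).1
    have hl := (pvFwd_spec g m n).2
    have hd := (pvBwd_spec g m n).1
    have hr := (pvBwd_spec g m n).2
    have hUv : pvMget (pvFwd g m n).1 i j = (pvUp g j i : Int) := by
      rw [hu.2.2 i j, if_pos ⟨hi, hj⟩]; rfl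
    have hDv : pvMget (pvBwd g m n).1 i j = (pvDown g m j i : Int) := by
      rw [hd.2.2 i j, if_pos ⟨hi, hj⟩]; rfl
    have hLv : pvMget (pvFwd g m n).2 i j = (pvLeft g i j : Int) := by
      rw [hl.2.2 i j, if_pos ⟨hi, hj⟩]; rfl
    have hRv : pvMget (pvBwd g m n).2 i j = (pvRight g n i j : Int) := by
      rw [hr.2.2 i j, if_pos ⟨hi, hj⟩]; rfl
    -- the common arm bound
    set K : Nat := min (min (min (pvUp g j i) (pvDown g m j i)) (pvLeft g i j)) (pvRight g n i j)
      with hK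
    have hK1 : 1 ≤ K := by
      have := pvUp_pos g j i hG
      have := pvDown_pos g m j i hG
      have := pvLeft_pos g i j hG
      have := pvRight_pos g n i j hG
      omega
    have harm : (min (min (min (pvMget (pvFwd g m n).1 i j) (pvMget (pvBwd g m n).1 i j))
        (pvMget (pvFwd g m n).2 i j)) (pvMget (pvBwd g m n).2 i j) - 1 + 1).toNat = K := by
      rw [hUv, hDv, hLv, hRv]
      push_cast [← Nat.cast_min]
      omega
    have hcond : ∀ s, 1 ≤ s → s < K → pvCond g m n i j s := by
      intro s hs1 hsK
      have hup := pvUp_lt g j i s (by omega)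
      have hdn := pvDown_lt g m j i hi s (by omega)
      have hlf := pvLeft_lt g i j s (by omega)
      have hrt := pvRight_lt g n i j hj s (by omega)
      exact ⟨hup.1, hdn.1, hlf.1, hrt.1, hup.2, hdn.2, hlf.2, hrt.2⟩
    have hstop : ¬ pvCond g m n i j K := by
      intro hc
      obtain ⟨c1, c2, c3, c4, c5, c6, c7, c8⟩ := hc
      have hcase : K = pvUp g j i ∨ K = pvDown g m j i ∨ K = pvLeft g i j ∨
          K = pvRight g n i j := by omega
      rcases hcase with he | he | he | he
      · rcases pvUp_stop g j i hG with h' | ⟨h1', h2'⟩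
        · omega
        · exact h2' (he ▸ c5)
      · rcases pvDown_stop g m j i hi hG with h' | ⟨h1', h2'⟩
        · omega
        · exact h2' (he ▸ c6)
      · rcases pvLeft_stop g i j hG with h' | ⟨h1', h2'⟩
        · omega
        · exact h2' (he ▸ c7)
      · rcases pvRight_stop g n i j hj hG with h' | ⟨h1', h2'⟩
        · omega
        · exact h2' (he ▸ c8)
    rw [pvCellA, if_pos hGb, pvCellB, if_pos hGb]
    rw [PySem.List.foldl_append_singleton_eq_map]
    have hrun := pvExpand_run g m n i j K hcond hstop (K - 1) 1
      (acc ++ [((1 : Int), pvBit n i j)]) (by omega) (le_refl 1)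
    rw [show (1 : Nat) - 1 = 0 by rfl, pvMaskA_zero] at hrun
    rw [hrun, harm]
    rw [pvRange_decomp K hK1]
    rw [List.map_cons, List.append_assoc, List.singleton_append]
    norm_num [pvMaskA_zero]
  · have hGb : ¬ ((pvGat g i j == 'G') = true) := by simpa using hG
    rw [pvCellA, if_neg hGb, pvCellB, if_neg hGb]

theorem twoPluses_spec : Claim_equal_twoPluses := by
  intro grid _ _
  unfold Spec_twoPluses twoPluses twoPluses_alt
  simp only []
  congr 1
  refine congrArg (fun l => PySem.List.sorted l (fun p => toLex p) true) ?_
  refine PySem.List.foldl_congr_mem _ _ _ _ ?_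
  intro acc i hi
  refine PySem.List.foldl_congr_mem _ _ _ _ ?_
  intro acc2 j hj
  exact pvCell_eq _ _ _ i j (List.mem_range.mp hi) (List.mem_range.mp hj) acc2
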